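-- pv_equiv track=rewrite | github.com/noibar/face_representation_from_video | organize_frames_by_identity.py | get_frames_by_track
-- ===== SOURCE A (Python) =====
-- def get_frame_track(frame):
--     return frame.split('_')[0]
--
-- def get_frames_by_track(frames):
--     frames_by_track = {}
--     for f in frames:
--         t = get_frame_track(f)
--         if t not in frames_by_track:
--             frames_by_track[t] = []
--         frames_by_track[t].append(f)
--     return frames_by_track
-- ===== SOURCE B (Python) =====
-- def get_frames_by_track(frames):
--     keys = list(dict.fromkeys(f.split('_')[0] for f in frames))
--     return {k: [f for f in frames if f.split('_')[0] == k] for k in keys}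
-- ===== Notes on version B (the rewrite author's own statement) =====
-- stated objective: alternative
-- what changed: Replaces the single-pass dict accumulation with a two-phase pipeline: first dedup the track keys in first-occurrence order (dict.fromkeys), then build each group by filtering the frame list per key.
import Mathlib
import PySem

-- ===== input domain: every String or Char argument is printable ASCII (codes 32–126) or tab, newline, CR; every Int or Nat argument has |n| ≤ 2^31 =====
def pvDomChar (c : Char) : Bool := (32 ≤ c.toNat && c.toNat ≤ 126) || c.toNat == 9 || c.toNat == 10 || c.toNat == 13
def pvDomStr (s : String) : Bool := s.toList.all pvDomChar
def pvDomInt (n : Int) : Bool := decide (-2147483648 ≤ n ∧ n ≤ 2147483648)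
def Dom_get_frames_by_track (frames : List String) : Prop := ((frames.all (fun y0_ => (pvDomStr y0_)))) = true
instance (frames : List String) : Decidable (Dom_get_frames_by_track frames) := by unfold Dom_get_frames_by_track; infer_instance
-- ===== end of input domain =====

-- B replaces A's one-pass dict accumulation by a dedup-keys-then-filter-per-key pipeline (alternative decomposition, same values).
-- helper shared by both ports (module helper get_frame_track): Python split('_') always returns a
-- nonempty list and the separator "_" is nonempty, so split? is some and [0] is exactly the head
-- (getD/headD never take their defaults here).
def getFrameTrack (f : String) : String := ((PySem.Str.split? f "_").getD []).headD ""

-- ===== PORT A =====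
def get_frames_by_track (frames : List String) : List (String × List String) :=
  (frames.foldl (fun d f =>
      let t := getFrameTrack f
      let d1 := if d.contains t then d else d.insert t ([] : List String)
      d1.modify t [] (fun xs => xs ++ [f]))
    PySem.Dict.empty).items

-- ===== PORT B =====
def get_frames_by_track_alt (frames : List String) : List (String × List String) :=
  (PySem.List.dedup (frames.map getFrameTrack)).map
    (fun k => (k, frames.filter (fun f => getFrameTrack f == k)))


-- ===== PRECONDITION & SPEC =====
def Spec_get_frames_by_track (frames : List String) (out : List (String × List String)) : Prop := out = get_frames_by_track_alt frames
instance (frames : List String) (out : List (String × List String)) : Decidable (Spec_get_frames_by_track frames out) := by unfold Spec_get_frames_by_track; infer_instance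

-- ===== CLAIM (what is proved, stated in full; the proofs are below) =====
def Claim_equal_get_frames_by_track : Prop := ∀ (frames : List String), Dom_get_frames_by_track frames → Spec_get_frames_by_track frames (get_frames_by_track frames)

-- ===== LEMMAS AND PROOFS =====
-- A's loop step equals a bare modify: the conditional empty-insert is absorbed by modify's default.
theorem step_eq_modify (d : PySem.Dict String (List String)) (f : String) :
    (let t := getFrameTrack f
     let d1 := if d.contains t then d else d.insert t ([] : List String)
     d1.modify t [] (fun xs => xs ++ [f]))
    = d.modify (getFrameTrack f) [] (fun xs => xs ++ [f]) := by
  by_cases h : d.contains (getFrameTrack f)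
  · simp [h]
  · have hc : d.contains (getFrameTrack f) = false := by simpa using h
    simp [hc, PySem.Dict.modify, PySem.Dict.getD_insert_self, PySem.Dict.insert_insert_self,
      PySem.Dict.getD_of_not_contains d _ hc]

theorem get_frames_by_track_spec : Claim_equal_get_frames_by_track := by
  intro frames _
  unfold Spec_get_frames_by_track get_frames_by_track get_frames_by_track_alt
  rw [show (fun (d : PySem.Dict String (List String)) (f : String) =>
        let t := getFrameTrack f
        let d1 := if d.contains t then d else d.insert t ([] : List String)
        d1.modify t [] (fun xs => xs ++ [f]))
      = (fun d f => d.modify (getFrameTrack f) [] (fun xs => xs ++ [f]))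
      from funext fun d => funext fun f => step_eq_modify d f]
  rw [PySem.Dict.items_eq_map_keys _
        (PySem.Dict.nodup_keys_foldl_modify_key frames getFrameTrack []
          (fun _ f => fun xs => xs ++ [f]) PySem.Dict.empty (by simp)) []]
  rw [PySem.Dict.keys_foldl_modify_key]
  simp only [PySem.Dict.keys_empty, PySem.Set.update_nil_left, ← PySem.List.dedup_eq_ofList]
  refine List.map_congr_left (fun k _ => ?_)
  have hm : frames.foldl (fun d f => d.modify (getFrameTrack f) [] (fun xs => xs ++ [f]))
        PySem.Dict.empty
      = (frames.map (fun f => (getFrameTrack f, f))).foldl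
          (fun d p => d.modify p.1 [] (fun xs => xs ++ [p.2])) PySem.Dict.empty := by
    rw [List.foldl_map]
  rw [hm, PySem.Dict.getD_foldl_modify_append]
  simp [List.filter_map, Function.comp_def]
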